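-- pv_equiv track=rewrite | github.com/courtneyfugate-ctrl/logic-miner-engine | tests/test_logos_taxonomy.py | generate_mixed_logic_data
-- ===== SOURCE A (Python) =====
-- def generate_mixed_logic_data(n=100, boundary=50):
--     """
--     Deontic Logic (Rule A) -> Default Logic (Rule B)
--     Domain: Integers 0..n
--     Phase Shift at 'boundary'.
--
--     Rule A: y = 3x + 1
--     Rule B: y = 5x + 6
--     """
--     inputs = list(range(n))
--     outputs = []
--     regime = [] # 0 for A, 1 for B
--
--     for x in inputs:
--         if x < boundary:
--             outputs.append(3*x + 1)
--             regime.append(0)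
--         else:
--             # Shift!
--             outputs.append(5*x + 6)
--             regime.append(1)
--
--     return inputs, outputs, regime
-- ===== SOURCE B (Python) =====
-- def generate_mixed_logic_data(n=100, boundary=50):
--     cut = max(0, min(boundary, n))
--     inputs = list(range(n))
--     outputs = [3*x + 1 for x in range(cut)] + [5*x + 6 for x in range(cut, n)]
--     regime = [0]*cut + [1]*(n - cut)
--     return inputs, outputs, regime
-- ===== Notes on version B (the rewrite author's own statement) =====
-- stated objective: simpler
-- what changed: Replaces the per-element branch loop by a one-time split index cut = max(0, min(boundary, n)) and block construction of the three lists (two comprehensions plus list-repetition).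
import Mathlib
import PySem

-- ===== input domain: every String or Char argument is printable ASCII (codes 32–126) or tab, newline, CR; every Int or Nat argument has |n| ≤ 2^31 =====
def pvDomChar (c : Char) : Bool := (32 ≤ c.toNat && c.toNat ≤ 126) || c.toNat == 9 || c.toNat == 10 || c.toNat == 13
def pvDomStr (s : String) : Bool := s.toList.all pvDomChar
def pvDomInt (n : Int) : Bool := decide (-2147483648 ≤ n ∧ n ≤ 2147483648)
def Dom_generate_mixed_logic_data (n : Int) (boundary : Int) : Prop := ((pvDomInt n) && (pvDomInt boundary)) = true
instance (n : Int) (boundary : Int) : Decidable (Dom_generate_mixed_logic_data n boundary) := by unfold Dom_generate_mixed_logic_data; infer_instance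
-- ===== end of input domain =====

-- B replaces A's per-element branch loop by a single split index cut = max(0, min(boundary, n))
-- and builds the three lists blockwise (objective: simpler — no per-element branch).

-- ===== PORT A =====
-- literal port: inputs = range(n); one loop appending to outputs and regime with a branch on x < boundary
def generate_mixed_logic_data (n : Int) (boundary : Int) : List Int × List Int × List Int :=
  let inputs := PySem.List.pyRange 0 n 1
  let p := inputs.foldl
    (fun (acc : List Int × List Int) x =>
      if x < boundary then (acc.1 ++ [3 * x + 1], acc.2 ++ [0])
      else (acc.1 ++ [5 * x + 6], acc.2 ++ [1]))
    ([], [])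
  (inputs, p.1, p.2)

-- ===== PORT B =====
-- literal port of Source B: split index, two mapped ranges, two replicated blocks
def generate_mixed_logic_data_alt (n : Int) (boundary : Int) : List Int × List Int × List Int :=
  let cut := max 0 (min boundary n)
  let inputs := PySem.List.pyRange 0 n 1
  let outputs := (PySem.List.pyRange 0 cut 1).map (fun x => 3 * x + 1)
      ++ (PySem.List.pyRange cut n 1).map (fun x => 5 * x + 6)
  let regime := List.replicate cut.toNat (0 : Int) ++ List.replicate (n - cut).toNat (1 : Int)
  (inputs, outputs, regime)

-- ===== PRECONDITION & SPEC =====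
def Spec_generate_mixed_logic_data (n : Int) (boundary : Int) (out : List Int × List Int × List Int) : Prop := out = generate_mixed_logic_data_alt n boundary
instance (n : Int) (boundary : Int) (out : List Int × List Int × List Int) : Decidable (Spec_generate_mixed_logic_data n boundary out) := by unfold Spec_generate_mixed_logic_data; infer_instance

-- ===== CLAIM (what is proved, stated in full; the proofs are below) =====
def Claim_equal_generate_mixed_logic_data : Prop := ∀ (n : Int) (boundary : Int), Dom_generate_mixed_logic_data n boundary → Spec_generate_mixed_logic_data n boundary (generate_mixed_logic_data n boundary)

-- ===== LEMMAS AND PROOFS =====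

-- the loop invariant: A's fold over range(0,m) produces exactly B's two blocks, for the clamped cut
lemma gm_fold_eq (boundary : Int) (m : Nat) :
    (PySem.List.pyRange 0 m 1).foldl
      (fun (acc : List Int × List Int) x =>
        if x < boundary then (acc.1 ++ [3 * x + 1], acc.2 ++ [0])
        else (acc.1 ++ [5 * x + 6], acc.2 ++ [1]))
      ([], [])
    = ((PySem.List.pyRange 0 (max 0 (min boundary m)) 1).map (fun x => 3 * x + 1)
        ++ (PySem.List.pyRange (max 0 (min boundary m)) m 1).map (fun x => 5 * x + 6),
       List.replicate (max 0 (min boundary (m : Int))).toNat (0 : Int)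
        ++ List.replicate ((m : Int) - max 0 (min boundary m)).toNat (1 : Int)) := by
  induction m with
  | zero =>
      have h0 : max 0 (min boundary (0 : Int)) = 0 := by omega
      simp [h0, PySem.List.pyRange_one_eq_nil (le_refl (0 : Int))]
  | succ m ih =>
      have hm : ((m + 1 : Nat) : Int) = (m : Int) + 1 := by push_cast; ring
      have hsplit : PySem.List.pyRange 0 ((m + 1 : Nat) : Int) 1
          = PySem.List.pyRange 0 (m : Int) 1 ++ [(m : Int)] := by
        rw [hm, PySem.List.pyRange_one_succ_right (by positivity)]
      rw [hsplit, List.foldl_append, ih]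
      simp only [List.foldl]
      by_cases hb : (m : Int) < boundary
      · have hc1 : max 0 (min boundary ((m : Int) + 1)) = (m : Int) + 1 := by omega
        have hc0 : max 0 (min boundary (m : Int)) = (m : Int) := by omega
        rw [if_pos hb]
        rw [hm, hc1, hc0]
        have hr1 : PySem.List.pyRange 0 ((m : Int) + 1) 1
            = PySem.List.pyRange 0 (m : Int) 1 ++ [(m : Int)] := by
          rw [PySem.List.pyRange_one_succ_right (by positivity)]
        have htn : ((m : Int) + 1).toNat = m + 1 := by omega
        simp [hr1, PySem.List.pyRange_one_eq_nil (le_refl ((m : Int) + 1)),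
          PySem.List.pyRange_one_eq_nil (le_refl (m : Int)), htn,
          List.replicate_succ' (n := m), Int.toNat_of_nonneg (by positivity : (0:Int) ≤ m)]
      · push_neg at hb
        have hc1 : max 0 (min boundary ((m : Int) + 1)) = max 0 boundary := by omega
        have hc0 : max 0 (min boundary (m : Int)) = max 0 boundary := by omega
        rw [if_neg (by omega)]
        rw [hm, hc1, hc0]
        have hcle : max 0 boundary ≤ (m : Int) := by omega
        have hr2 : PySem.List.pyRange (max 0 boundary) ((m : Int) + 1) 1
            = PySem.List.pyRange (max 0 boundary) (m : Int) 1 ++ [(m : Int)] := by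
          rw [PySem.List.pyRange_one_succ_right hcle]
        have htn : ((m : Int) + 1 - max 0 boundary).toNat
            = ((m : Int) - max 0 boundary).toNat + 1 := by omega
        simp [hr2, htn, List.replicate_succ']

-- ===== VERDICT (by name: the statement is the Claim_ definition above) =====
theorem generate_mixed_logic_data_spec : Claim_equal_generate_mixed_logic_data := by
  intro n boundary _
  show _ = _
  unfold generate_mixed_logic_data generate_mixed_logic_data_alt
  by_cases hn : n ≤ 0
  · have hc : max 0 (min boundary n) = 0 := by omega
    have h1 : PySem.List.pyRange 0 n 1 = [] := PySem.List.pyRange_one_eq_nil hn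
    simp [h1, hc, Int.toNat_of_nonpos hn]
  · push_neg at hn
    have hn' : n = (n.toNat : Int) := (Int.toNat_of_nonneg hn.le).symm
    rw [hn']
    dsimp only
    rw [gm_fold_eq boundary n.toNat]
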